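-- pv_equiv track=rewrite | github.com/ncheaz/graph_rag | graph_rag/extraction/relationship_analyzer.py | _find_import_statement
-- ===== SOURCE A (Python) =====
-- from typing import List, Dict, Set, Optional, Tuple
--
-- def _find_import_statement(code_content: str, start_pos: int) -> Optional[str]:
--     """Find the complete import statement starting from a position."""
--     lines = code_content.split('\n')
--     char_count = 0
--
--     for line in lines:
--         if char_count <= start_pos <= char_count + len(line):
--             # Found the line containing the import
--             stripped = line.strip()
--             if stripped.startswith('import'):
--                 return stripped
--         char_count += len(line) + 1  # +1 for newline
--
--     return None
-- ===== SOURCE B (Python) =====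
-- from typing import Optional
--
-- def _find_import_statement(code_content: str, start_pos: int) -> Optional[str]:
--     """Find the complete import statement starting from a position."""
--     if start_pos < 0 or start_pos > len(code_content):
--         return None
--     i = start_pos
--     while i > 0 and code_content[i - 1] != '\n':
--         i -= 1
--     j = start_pos
--     while j < len(code_content) and code_content[j] != '\n':
--         j += 1
--     stripped = code_content[i:j].strip()
--     if stripped.startswith('import'):
--         return stripped
--     return None
-- ===== Notes on version B (the rewrite author's own statement) =====
-- stated objective: alternative
-- what changed: Instead of splitting the text into a list of lines and scanning them with a cumulative character counter, B guards the range once and scans directly from start_pos backward and forward to the enclosing line's boundaries.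
import Mathlib
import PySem

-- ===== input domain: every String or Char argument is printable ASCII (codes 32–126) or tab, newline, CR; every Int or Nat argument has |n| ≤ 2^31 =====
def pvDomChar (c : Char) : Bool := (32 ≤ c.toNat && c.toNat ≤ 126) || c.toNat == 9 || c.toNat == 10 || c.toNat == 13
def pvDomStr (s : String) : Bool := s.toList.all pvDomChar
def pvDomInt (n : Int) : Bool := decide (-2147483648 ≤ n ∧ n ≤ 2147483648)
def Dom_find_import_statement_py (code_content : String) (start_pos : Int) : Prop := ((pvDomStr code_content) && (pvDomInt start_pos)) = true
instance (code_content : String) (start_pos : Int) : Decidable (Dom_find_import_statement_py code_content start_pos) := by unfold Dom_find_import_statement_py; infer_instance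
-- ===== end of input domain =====

-- B replaces A's split-into-lines scan with its cumulative character counter by two direct
-- in-place scans from the position to the enclosing line's boundaries (objective: alternative).

-- ===== PORT A =====
-- the 'for line in lines' loop with its running char_count
def pvLoopA : List (List Char) → Int → Int → Option (List Char)
  | [], _, _ => none
  | line :: rest, char_count, start_pos =>
    if char_count ≤ start_pos ∧ start_pos ≤ char_count + (line.length : Int) then
      let stripped := PySem.Chars.strip line
      if PySem.Chars.startswith stripped "import".toList then some stripped
      else pvLoopA rest (char_count + (line.length : Int) + 1) start_pos
    else pvLoopA rest (char_count + (line.length : Int) + 1) start_pos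

def find_import_statement_py (code_content : String) (start_pos : Int) : Option String :=
  (pvLoopA (PySem.Chars.splitOn code_content.toList ['\n']) 0 start_pos).map String.ofList

-- ===== PORT B =====
-- 'while i > 0 and code_content[i-1] != '\n': i -= 1' as structural recursion on i
def pvBack (cs : List Char) : Nat → Nat
  | 0 => 0
  | i + 1 => if cs.getD i ' ' ≠ '\n' then pvBack cs i else i + 1

-- 'while j < len(code_content) and code_content[j] != '\n': j += 1' as structural
-- recursion on the suffix code_content[j:]
def pvFwd : List Char → Nat → Nat
  | [], j => j
  | c :: rest, j => if c ≠ '\n' then pvFwd rest (j + 1) else j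

def find_import_statement_py_alt (code_content : String) (start_pos : Int) : Option String :=
  let cs := code_content.toList
  if start_pos < 0 ∨ (cs.length : Int) < start_pos then none
  else
    let p := start_pos.toNat
    let i := pvBack cs p
    let j := pvFwd (cs.drop p) p
    let stripped := PySem.Chars.strip (PySem.List.slice cs (some (i : Int)) (some (j : Int)))
    if PySem.Chars.startswith stripped "import".toList then some (String.ofList stripped) else none

-- ===== PRECONDITION & SPEC =====
def Spec_find_import_statement_py (code_content : String) (start_pos : Int) (out : Option String) : Prop := out = find_import_statement_py_alt code_content start_pos
instance (code_content : String) (start_pos : Int) (out : Option String) : Decidable (Spec_find_import_statement_py code_content start_pos out) := by unfold Spec_find_import_statement_py; infer_instance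

-- ===== CLAIM (what is proved, stated in full; the proofs are below) =====
def Claim_equal_find_import_statement_py : Prop := ∀ (code_content : String) (start_pos : Int), Dom_find_import_statement_py code_content start_pos → Spec_find_import_statement_py code_content start_pos (find_import_statement_py code_content start_pos)

-- ===== LEMMAS AND PROOFS =====

-- B's body on the list side, with Python's slice written as drop/take
def pvBcore (cs : List Char) (sp : Int) : Option (List Char) :=
  if sp < 0 ∨ (cs.length : Int) < sp then none
  else
    if PySem.Chars.startswith
        (PySem.Chars.strip
          ((cs.drop (pvBack cs sp.toNat)).take (pvFwd (cs.drop sp.toNat) sp.toNat - pvBack cs sp.toNat)))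
        "import".toList then
      some (PySem.Chars.strip
        ((cs.drop (pvBack cs sp.toNat)).take (pvFwd (cs.drop sp.toNat) sp.toNat - pvBack cs sp.toNat)))
    else none

lemma pvAlt_eq (cc : String) (sp : Int) :
    find_import_statement_py_alt cc sp = (pvBcore cc.toList sp).map String.ofList := by
  unfold find_import_statement_py_alt pvBcore
  simp only [PySem.List.slice_natCast]
  split_ifs <;> simp_all

-- ---- characterisation of splitOn on separator '\n' ----
lemma pvGo_nil (fuel : Nat) (cur : List Char) (acc : List (List Char)) :
    PySem.Chars.splitOn.go ['\n'] fuel [] cur acc = (cur.reverse :: acc).reverse := by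
  cases fuel with
  | zero => rw [PySem.Chars.splitOn.go.eq_1]; simp
  | succ f => rw [PySem.Chars.splitOn.go.eq_2 _ _ _ _ (by omega)]

lemma pvGo_cons (fuel : Nat) (c : Char) (rest cur : List Char) (acc : List (List Char)) :
    PySem.Chars.splitOn.go ['\n'] (fuel + 1) (c :: rest) cur acc =
      if c = '\n' then PySem.Chars.splitOn.go ['\n'] fuel rest [] (cur.reverse :: acc)
      else PySem.Chars.splitOn.go ['\n'] fuel rest (c :: cur) acc := by
  rw [PySem.Chars.splitOn.go.eq_3]
  by_cases hc : c = '\n'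
  · subst hc
    simp [List.isPrefixOf]
  · have hne : ('\n' : Char) ≠ c := fun hx => hc hx.symm
    simp [List.isPrefixOf, hc, hne]

lemma pvGo_no_nl : ∀ (s : List Char) (fuel : Nat) (cur : List Char) (acc : List (List Char)),
    '\n' ∉ s → s.length ≤ fuel →
    PySem.Chars.splitOn.go ['\n'] fuel s cur acc = ((cur.reverse ++ s) :: acc).reverse
  | [], fuel, cur, acc, _, _ => by simp [pvGo_nil]
  | c :: rest, fuel, cur, acc, h, hf => by
    cases fuel with
    | zero => simp at hf
    | succ f =>
      have hc : c ≠ '\n' := fun hc => h (hc ▸ List.mem_cons_self)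
      have hr : '\n' ∉ rest := fun hr => h (List.mem_cons_of_mem _ hr)
      have hfr : rest.length ≤ f := by simp at hf; omega
      rw [pvGo_cons, if_neg hc, pvGo_no_nl rest f (c :: cur) acc hr hfr]
      simp

lemma pvGo_acc : ∀ (s : List Char) (fuel : Nat) (cur : List Char) (acc : List (List Char)),
    s.length ≤ fuel →
    PySem.Chars.splitOn.go ['\n'] fuel s cur acc =
      acc.reverse ++ PySem.Chars.splitOn.go ['\n'] fuel s cur []
  | [], fuel, cur, acc, _ => by simp [pvGo_nil]
  | c :: rest, fuel, cur, acc, hf => by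
    cases fuel with
    | zero => simp at hf
    | succ f =>
      have hfr : rest.length ≤ f := by simp at hf; omega
      by_cases hc : c = '\n'
      · rw [pvGo_cons, if_pos hc, pvGo_cons, if_pos hc,
            pvGo_acc rest f [] (cur.reverse :: acc) hfr, pvGo_acc rest f [] [cur.reverse] hfr]
        simp
      · rw [pvGo_cons, if_neg hc, pvGo_cons, if_neg hc, pvGo_acc rest f (c :: cur) acc hfr]

lemma pvGo_step : ∀ (l : List Char) (fuel : Nat) (cur : List Char) (acc : List (List Char))
    (rest : List Char), '\n' ∉ l →
    PySem.Chars.splitOn.go ['\n'] (l.length + (fuel + 1)) (l ++ '\n' :: rest) cur acc =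
      PySem.Chars.splitOn.go ['\n'] fuel rest [] ((cur.reverse ++ l) :: acc)
  | [], fuel, cur, acc, rest, _ => by
    rw [show ([] : List Char).length + (fuel + 1) = fuel + 1 by simp]
    simp only [List.nil_append]
    rw [pvGo_cons, if_pos rfl]
    simp
  | c :: l, fuel, cur, acc, rest, h => by
    have hc : c ≠ '\n' := fun hc => h (hc ▸ List.mem_cons_self)
    have hl : '\n' ∉ l := fun hl => h (List.mem_cons_of_mem _ hl)
    rw [show (c :: l).length + (fuel + 1) = (l.length + (fuel + 1)) + 1 by simp [List.length_cons]; omega]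
    simp only [List.cons_append]
    rw [pvGo_cons, if_neg hc, pvGo_step l fuel (c :: cur) acc rest hl]
    simp

lemma pvSplitOn_no_nl (cs : List Char) (h : '\n' ∉ cs) :
    PySem.Chars.splitOn cs ['\n'] = [cs] := by
  unfold PySem.Chars.splitOn
  rw [pvGo_no_nl cs (cs.length + 1) [] [] h (by omega)]
  simp

lemma pvSplitOn_cons (l rest : List Char) (hl : '\n' ∉ l) :
    PySem.Chars.splitOn (l ++ '\n' :: rest) ['\n'] = l :: PySem.Chars.splitOn rest ['\n'] := by
  unfold PySem.Chars.splitOn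
  rw [show (l ++ '\n' :: rest).length + 1 = l.length + ((rest.length + 1) + 1) by simp; omega,
      pvGo_step l (rest.length + 1) [] [] rest hl,
      pvGo_acc rest (rest.length + 1) [] [[].reverse ++ l] (by omega)]
  simp

-- unfolding helpers (the structural equations, stated once)
lemma pvLoopA_cons (l : List Char) (ls : List (List Char)) (cc sp : Int) :
    pvLoopA (l :: ls) cc sp =
      if cc ≤ sp ∧ sp ≤ cc + (l.length : Int) then
        (if PySem.Chars.startswith (PySem.Chars.strip l) "import".toList then
          some (PySem.Chars.strip l)
        else pvLoopA ls (cc + (l.length : Int) + 1) sp)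
      else pvLoopA ls (cc + (l.length : Int) + 1) sp := rfl

lemma pvBack_succ (cs : List Char) (i : Nat) :
    pvBack cs (i + 1) = if cs.getD i ' ' ≠ '\n' then pvBack cs i else i + 1 := rfl

-- ---- the A-side loop ----
lemma pvLoopA_lt : ∀ (ls : List (List Char)) (cc sp : Int), sp < cc → pvLoopA ls cc sp = none
  | [], _, _, _ => rfl
  | l :: ls, cc, sp, h => by
    rw [pvLoopA_cons, if_neg (by omega), pvLoopA_lt ls (cc + l.length + 1) sp (by omega)]

lemma pvLoopA_shift : ∀ (ls : List (List Char)) (cc sp d : Int),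
    pvLoopA ls (cc + d) (sp + d) = pvLoopA ls cc sp
  | [], _, _, _ => rfl
  | l :: ls, cc, sp, d => by
    rw [pvLoopA_cons, pvLoopA_cons]
    have hrec : pvLoopA ls (cc + d + (l.length : Int) + 1) (sp + d) =
        pvLoopA ls (cc + (l.length : Int) + 1) sp := by
      rw [show cc + d + (l.length : Int) + 1 = (cc + (l.length : Int) + 1) + d by ring,
          pvLoopA_shift ls (cc + (l.length : Int) + 1) sp d]
    by_cases hcond : cc ≤ sp ∧ sp ≤ cc + (l.length : Int)
    · rw [if_pos (by omega), if_pos hcond, hrec]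
    · rw [if_neg (by omega), if_neg hcond, hrec]

-- ---- the B-side scans ----
lemma pvBack_no_nl : ∀ (cs : List Char) (p : Nat), '\n' ∉ cs.take p → pvBack cs p = 0
  | _, 0, _ => rfl
  | cs, p + 1, h => by
    have hsub : cs.take p ⊆ cs.take (p + 1) := by
      intro x hx
      rw [show p = min p (p + 1) by omega, ← List.take_take] at hx
      exact List.take_subset _ _ hx
    have hne : cs.getD p ' ' ≠ '\n' := by
      by_cases hp : p < cs.length
      · rw [List.getD_eq_getElem cs ' ' hp]
        intro hx
        apply h
        have hlt : p < (cs.take (p + 1)).length := by simp; omega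
        have h2 : (cs.take (p + 1))[p] = cs[p] := List.getElem_take
        rw [← hx, ← h2]
        exact List.getElem_mem _
      · rw [List.getD_eq_default cs ' ' (by omega)]; decide
    rw [pvBack_succ, if_pos hne, pvBack_no_nl cs p (fun hx => h (hsub hx))]

lemma pvGetD_append_right (l r : List Char) (k : Nat) :
    (l ++ r).getD (l.length + k) ' ' = r.getD k ' ' := by
  simp [List.getD, List.getElem?_append_right]

lemma pvBack_append (l rest : List Char) : ∀ (k : Nat),
    pvBack (l ++ '\n' :: rest) (l.length + 1 + k) = l.length + 1 + pvBack rest k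
  | 0 => by
    have h0 : (l ++ '\n' :: rest).getD l.length ' ' = '\n' := by
      have h1 := pvGetD_append_right l ('\n' :: rest) 0
      simp only [Nat.add_zero] at h1
      rw [h1]
      rfl
    rw [show l.length + 1 + 0 = l.length + 1 by omega, pvBack_succ, if_neg (fun hne => hne h0)]
    simp [pvBack]
  | k + 1 => by
    have hidx : (l ++ '\n' :: rest).getD (l.length + 1 + k) ' ' = rest.getD k ' ' := by
      have := pvGetD_append_right l ('\n' :: rest) (k + 1)
      rw [show l.length + 1 + k = l.length + (k + 1) by omega, this]
      simp [List.getD]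
    rw [show l.length + 1 + (k + 1) = (l.length + 1 + k) + 1 by omega, pvBack_succ, hidx,
        pvBack_succ]
    by_cases hc : rest.getD k ' ' = '\n'
    · rw [if_neg (fun hne => hne hc), if_neg (fun hne => hne hc)]
      omega
    · rw [if_pos hc, if_pos hc, pvBack_append l rest k]

lemma pvFwd_no_nl : ∀ (m : List Char) (j : Nat), '\n' ∉ m → pvFwd m j = j + m.length
  | [], j, _ => by simp [pvFwd]
  | c :: m, j, h => by
    have hc : c ≠ '\n' := fun hc => h (hc ▸ List.mem_cons_self)
    have hm : '\n' ∉ m := fun hm => h (List.mem_cons_of_mem _ hm)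
    rw [pvFwd, if_pos hc, pvFwd_no_nl m (j + 1) hm]
    simp
    omega

lemma pvFwd_append (m r : List Char) (hm : '\n' ∉ m) : ∀ (j : Nat),
    pvFwd (m ++ '\n' :: r) j = j + m.length := by
  induction m with
  | nil =>
    intro j
    rw [List.nil_append, pvFwd, if_neg (by simp)]
    simp
  | cons c m ih =>
    intro j
    have hc : c ≠ '\n' := fun hc => hm (hc ▸ List.mem_cons_self)
    have hm' : '\n' ∉ m := fun hx => hm (List.mem_cons_of_mem _ hx)
    rw [List.cons_append, pvFwd, if_pos hc, ih hm' (j + 1)]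
    simp
    omega

lemma pvFwd_shift : ∀ (m : List Char) (j d : Nat), pvFwd m (j + d) = pvFwd m j + d
  | [], _, _ => rfl
  | c :: m, j, d => by
    by_cases hc : c = '\n'
    · rw [pvFwd, if_neg (by simp [hc]), pvFwd, if_neg (by simp [hc])]
    · rw [pvFwd, if_pos hc, pvFwd, if_pos hc,
          show j + d + 1 = (j + 1) + d by omega, pvFwd_shift m (j + 1) d]

-- ---- decomposition at the first newline ----
lemma pvDecomp : ∀ (cs : List Char), '\n' ∈ cs →
    ∃ l rest, cs = l ++ '\n' :: rest ∧ '\n' ∉ l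
  | [], h => absurd h (by simp)
  | c :: cs, h => by
    by_cases hc : c = '\n'
    · exact ⟨[], cs, by simp [hc], by simp⟩
    · have h' : '\n' ∈ cs := by
        rcases List.mem_cons.mp h with h1 | h2
        · exact absurd h1.symm hc
        · exact h2
      obtain ⟨l, rest, hcs, hl⟩ := pvDecomp cs h'
      exact ⟨c :: l, rest, by simp [hcs], by
        simp only [List.mem_cons, not_or]
        exact ⟨fun hx => hc hx.symm, hl⟩⟩

-- ---- the two sides agree ----
lemma pvMain_no_nl (cs : List Char) (h : '\n' ∉ cs) (sp : Int) :
    pvLoopA [cs] 0 sp = pvBcore cs sp := by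
  unfold pvBcore
  by_cases hr : 0 ≤ sp ∧ sp ≤ (cs.length : Int)
  · have hi : pvBack cs sp.toNat = 0 :=
      pvBack_no_nl cs sp.toNat (fun hx => h (List.take_subset _ _ hx))
    have hj : pvFwd (cs.drop sp.toNat) sp.toNat = cs.length := by
      rw [pvFwd_no_nl _ _ (fun hx => h (List.drop_subset _ _ hx))]
      simp
      omega
    have c1 : ¬(sp < 0 ∨ (cs.length : Int) < sp) := by omega
    have c2 : (0 : Int) ≤ sp ∧ sp ≤ 0 + (cs.length : Int) := by omega
    rw [if_neg c1, hi, hj, pvLoopA_cons, if_pos c2]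
    simp [pvLoopA]
  · have c1 : sp < 0 ∨ (cs.length : Int) < sp := by omega
    have c2 : ¬((0 : Int) ≤ sp ∧ sp ≤ 0 + (cs.length : Int)) := by omega
    rw [if_pos c1, pvLoopA_cons, if_neg c2]
    rfl

lemma pvBcore_shift (l rest : List Char) (sp : Int) (hge : (l.length : Int) + 1 ≤ sp) :
    pvBcore (l ++ '\n' :: rest) sp = pvBcore rest (sp - (l.length : Int) - 1) := by
  have hclen : (l ++ '\n' :: rest).length = l.length + 1 + rest.length := by
    simp
    omega
  unfold pvBcore
  by_cases hbig : (rest.length : Int) < sp - (l.length : Int) - 1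
  · have c1 : sp < 0 ∨ ((l ++ '\n' :: rest).length : Int) < sp := by omega
    have c2 : sp - (l.length : Int) - 1 < 0 ∨ (rest.length : Int) < sp - (l.length : Int) - 1 := by
      omega
    rw [if_pos c1, if_pos c2]
  · have c1 : ¬(sp < 0 ∨ ((l ++ '\n' :: rest).length : Int) < sp) := by omega
    have c2 : ¬(sp - (l.length : Int) - 1 < 0 ∨
        (rest.length : Int) < sp - (l.length : Int) - 1) := by omega
    rw [if_neg c1, if_neg c2]
    have hk : sp.toNat = l.length + 1 + (sp - (l.length : Int) - 1).toNat := by omega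
    set k := (sp - (l.length : Int) - 1).toNat with hkdef
    have hdropk : (l ++ '\n' :: rest).drop (l.length + 1 + k) = rest.drop k := by
      rw [show l.length + 1 + k = l.length + (1 + k) by omega,
          List.drop_length_add_append (1 + k), show (1 : Nat) + k = k + 1 by omega,
          List.drop_succ_cons]
    have hdropi : (l ++ '\n' :: rest).drop (l.length + 1 + pvBack rest k) =
        rest.drop (pvBack rest k) := by
      rw [show l.length + 1 + pvBack rest k = l.length + (1 + pvBack rest k) by omega,
          List.drop_length_add_append (1 + pvBack rest k),
          show (1 : Nat) + pvBack rest k = pvBack rest k + 1 by omega, List.drop_succ_cons]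
    rw [hk, pvBack_append l rest k, hdropk,
        show l.length + 1 + k = k + (l.length + 1) by omega,
        pvFwd_shift (rest.drop k) k (l.length + 1), hdropi,
        show pvFwd (rest.drop k) k + (l.length + 1) - (l.length + 1 + pvBack rest k) =
          pvFwd (rest.drop k) k - pvBack rest k by omega]

lemma pvMain : ∀ (n : Nat) (cs : List Char), cs.length ≤ n → ∀ (sp : Int),
    pvLoopA (PySem.Chars.splitOn cs ['\n']) 0 sp = pvBcore cs sp := by
  intro n
  induction n with
  | zero =>
    intro cs hlen sp
    have hnil : cs = [] := List.eq_nil_of_length_eq_zero (by omega)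
    subst hnil
    rw [pvSplitOn_no_nl _ (by simp), pvMain_no_nl _ (by simp)]
  | succ n ih =>
    intro cs hlen sp
    by_cases hmem : '\n' ∈ cs
    · obtain ⟨l, rest, rfl, hl⟩ := pvDecomp cs hmem
      have hclen : (l ++ '\n' :: rest).length = l.length + 1 + rest.length := by
        simp
        omega
      rw [pvSplitOn_cons l rest hl]
      by_cases hneg : sp < 0
      · rw [pvLoopA_lt _ 0 sp hneg]
        unfold pvBcore
        rw [if_pos (Or.inl hneg)]
      · by_cases hin : sp ≤ (l.length : Int)
        · -- the position lies on the first line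
          have hnone : pvLoopA (PySem.Chars.splitOn rest ['\n'])
              (0 + (l.length : Int) + 1) sp = none :=
            pvLoopA_lt _ _ _ (by omega)
          have hp : sp.toNat ≤ l.length := by omega
          have htake : (l ++ '\n' :: rest).take sp.toNat = l.take sp.toNat :=
            List.take_append_of_le_length hp
          have hi : pvBack (l ++ '\n' :: rest) sp.toNat = 0 := by
            apply pvBack_no_nl
            rw [htake]
            exact fun hx => hl (List.take_subset _ _ hx)
          have hdrop : (l ++ '\n' :: rest).drop sp.toNat = l.drop sp.toNat ++ '\n' :: rest :=
            List.drop_append_of_le_length hp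
          have hj : pvFwd ((l ++ '\n' :: rest).drop sp.toNat) sp.toNat = l.length := by
            rw [hdrop, pvFwd_append _ _ (fun hx => hl (List.drop_subset _ _ hx))]
            simp
            omega
          have hsl : ((l ++ '\n' :: rest).drop 0).take (l.length - 0) = l := by
            simp
          unfold pvBcore
          have c1 : ¬(sp < 0 ∨ (((l ++ '\n' :: rest).length : Int)) < sp) := by omega
          have c2 : (0 : Int) ≤ sp ∧ sp ≤ 0 + (l.length : Int) := by omega
          rw [if_neg c1, hi, hj, hsl, pvLoopA_cons, if_pos c2, hnone]
        · -- the position lies past the first line and its newline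
          have hge : (l.length : Int) + 1 ≤ sp := by omega
          have c1 : ¬((0 : Int) ≤ sp ∧ sp ≤ 0 + (l.length : Int)) := by omega
          rw [pvLoopA_cons, if_neg c1]
          have hshift : pvLoopA (PySem.Chars.splitOn rest ['\n']) (0 + (l.length : Int) + 1) sp =
              pvLoopA (PySem.Chars.splitOn rest ['\n']) 0 (sp - (l.length : Int) - 1) := by
            have hs := pvLoopA_shift (PySem.Chars.splitOn rest ['\n']) 0
              (sp - (l.length : Int) - 1) ((l.length : Int) + 1)
            rw [show (0 : Int) + ((l.length : Int) + 1) = 0 + (l.length : Int) + 1 by ring,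
                show sp - (l.length : Int) - 1 + ((l.length : Int) + 1) = sp by ring] at hs
            exact hs
          have hrlen : rest.length ≤ n := by
            omega
          rw [hshift, ih rest hrlen (sp - (l.length : Int) - 1),
              ← pvBcore_shift l rest sp hge]
    · rw [pvSplitOn_no_nl cs hmem, pvMain_no_nl cs hmem sp]

-- ===== VERDICT (by name: the statement is the Claim_ definition above) =====
theorem find_import_statement_py_spec : Claim_equal_find_import_statement_py := by
  intro cc sp _
  unfold Spec_find_import_statement_py find_import_statement_py
  rw [pvMain cc.toList.length cc.toList le_rfl sp, pvAlt_eq]
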